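-- pv_equiv track=rewrite | github.com/StanfordBDHG/RadGPT | firebase/functions/text_mapping/radgraph_text_mapper.py | __map_all_token_entities_to_text_ranges
-- ===== SOURCE A (Python) =====
-- from typing import Any, Dict, List, Tuple, TypeVar
--
-- def __map_all_token_entities_to_text_ranges(
--     total_tokens: List[str], user_provided_text: str
-- ) -> Dict[int, Tuple[int, int, str]]:
--     total_entities_to_text_ranges_dict = {}
--
--     text_pointer = 0
--     for token_index, token in enumerate(total_tokens):
--         while text_pointer < len(user_provided_text):
--             next_text_pointer = 0
--
--             while (
--                 next_text_pointer < len(token)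
--                 and next_text_pointer + text_pointer < len(user_provided_text)
--                 and token[next_text_pointer]
--                 == user_provided_text[text_pointer + next_text_pointer]
--             ):
--                 next_text_pointer += 1
--
--             if next_text_pointer >= len(token):
--                 total_entities_to_text_ranges_dict[token_index] = (
--                     text_pointer,
--                     text_pointer + next_text_pointer,
--                 )
--
--                 text_pointer += next_text_pointer
--                 break
--             text_pointer += 1
--     return total_entities_to_text_ranges_dict
-- ===== SOURCE B (Python) =====
-- def __map_all_token_entities_to_text_ranges(total_tokens, user_provided_text):
--     text = user_provided_text
--     n = len(text)
--     # stage 1: occurrence index — for each distinct token, every (start, end)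
--     # slice of the text equal to it, in increasing position order
--     index = {}
--     for tok in total_tokens:
--         if tok not in index:
--             index[tok] = [
--                 (i, i + len(tok))
--                 for i in range(n + 1)
--                 if text[i:i + len(tok)] == tok
--             ]
--     # stage 2: walk the tokens, taking for each one the first indexed
--     # occurrence that does not start before the cursor
--     ranges = {}
--     pos = 0
--     for token_index, tok in enumerate(total_tokens):
--         if pos >= n:
--             break
--         hit = next((se for se in index[tok] if se[0] >= pos), None)
--         if hit is None:
--             break
--         ranges[token_index] = hit
--         pos = hit[1]
--     return ranges
-- ===== Notes on version B (the rewrite author's own statement) =====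
-- stated objective: alternative
-- what changed: Replaces A's on-line scan (restarting a char-compare loop at every text position per token) with a two-stage algorithm: stage 1 builds a dict index of every (start, end) occurrence per distinct token, stage 2 walks the tokens picking for each the first indexed occurrence at or after the cursor.
import Mathlib
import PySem

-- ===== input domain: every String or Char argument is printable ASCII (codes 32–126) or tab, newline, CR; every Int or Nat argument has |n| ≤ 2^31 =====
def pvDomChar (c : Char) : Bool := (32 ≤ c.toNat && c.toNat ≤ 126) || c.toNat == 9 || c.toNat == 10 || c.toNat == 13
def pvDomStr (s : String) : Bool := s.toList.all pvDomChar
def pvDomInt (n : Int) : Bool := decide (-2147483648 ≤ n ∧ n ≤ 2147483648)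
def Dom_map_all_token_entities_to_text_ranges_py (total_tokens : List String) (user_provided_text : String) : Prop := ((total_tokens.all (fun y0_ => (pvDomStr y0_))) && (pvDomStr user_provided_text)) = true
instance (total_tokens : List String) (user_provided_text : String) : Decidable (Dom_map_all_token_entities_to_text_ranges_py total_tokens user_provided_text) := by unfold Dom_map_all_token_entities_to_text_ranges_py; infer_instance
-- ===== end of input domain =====

-- B replaces A's on-line forward scan with a two-stage algorithm: first a dict indexing,
-- for each distinct token, every occurrence (start, end) of it in the text, then a
-- selection pass taking for each token the first indexed occurrence at/after the cursor.

-- ===== PORT A =====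
-- A's innermost `while`: advances next_text_pointer while token and text characters agree
def pvInnerA (tok text : List Char) (tp ntp : Nat) : Nat :=
  if h : ntp < tok.length ∧ tp + ntp < text.length ∧
      tok.getD ntp ' ' = text.getD (tp + ntp) ' ' then
    pvInnerA tok text tp (ntp + 1)
  else ntp
termination_by tok.length - ntp
decreasing_by obtain ⟨h1, -, -⟩ := h; omega

-- A's middle `while text_pointer < len(...)` for one token: the new text_pointer and the
-- recorded (start, end) range if the token matched (`break`), none if the text ran out
def pvMidA (tok text : List Char) (tp : Nat) : Nat × Option (Nat × Nat) :=
  if h : tp < text.length then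
    let ntp := pvInnerA tok text tp 0
    if tok.length ≤ ntp then (tp + ntp, some (tp, tp + ntp))
    else pvMidA tok text (tp + 1)
  else (tp, none)
termination_by text.length - tp
decreasing_by omega

-- A's outer `for token_index, token in enumerate(total_tokens)`; the dict keys are the
-- strictly increasing token indices, so each dict insertion appends (cons built in order)
def pvOuterA (text : List Char) : List String → Nat → Nat → List (Int × Int × Int)
  | [], _, _ => []
  | tok :: rest, idx, tp =>
    match pvMidA tok.toList text tp with
    | (tp', some (s, e)) => ((idx : Int), (s : Int), (e : Int)) :: pvOuterA text rest (idx + 1) tp'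
    | (tp', none) => pvOuterA text rest (idx + 1) tp'

def map_all_token_entities_to_text_ranges_py (total_tokens : List String) (user_provided_text : String) : List (Int × Int × Int) :=
  pvOuterA user_provided_text.toList total_tokens 0 0

-- ===== PORT B =====
-- the comprehension `[(i, i + len(tok)) for i in range(n + 1) if text[i:i+len(tok)] == tok]`
def pvOcc (text tok : List Char) : List (Nat × Nat) :=
  ((List.range (text.length + 1)).filter
      (fun i : Nat => PySem.List.slice text (some (i : Int)) (some ((i : Int) + (tok.length : Int))) == tok)).map
    (fun i => (i, i + tok.length))

-- stage 1: `if tok not in index: index[tok] = [...occurrences...]` over all tokens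
def pvIndexB (text : List Char) (toks : List String) : PySem.Dict String (List (Nat × Nat)) :=
  toks.foldl
    (fun d tok => if d.contains tok = false then d.insert tok (pvOcc text tok.toList) else d)
    PySem.Dict.empty

-- stage 2: `next((se for se in index[tok] if se[0] >= pos), None)` per token, breaking
-- when the text is exhausted or no occurrence remains; index[tok] is total here because
-- stage 1 inserted every token of the list (so getD's default is never consulted)
def pvSelB (text : List Char) (index : PySem.Dict String (List (Nat × Nat))) :
    List String → Nat → Nat → List (Int × Int × Int)
  | [], _, _ => []
  | tok :: rest, idx, pos =>
    if text.length ≤ pos then []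
    else
      match (index.getD tok []).find? (fun se => decide (pos ≤ se.1)) with
      | none => []
      | some (s, e) => ((idx : Int), (s : Int), (e : Int)) :: pvSelB text index rest (idx + 1) e

def map_all_token_entities_to_text_ranges_py_alt (total_tokens : List String) (user_provided_text : String) : List (Int × Int × Int) :=
  pvSelB user_provided_text.toList (pvIndexB user_provided_text.toList total_tokens) total_tokens 0 0

-- ===== PRECONDITION & SPEC =====
def Spec_map_all_token_entities_to_text_ranges_py (total_tokens : List String) (user_provided_text : String) (out : List (Int × Int × Int)) : Prop := out = map_all_token_entities_to_text_ranges_py_alt total_tokens user_provided_text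
instance (total_tokens : List String) (user_provided_text : String) (out : List (Int × Int × Int)) : Decidable (Spec_map_all_token_entities_to_text_ranges_py total_tokens user_provided_text out) := by unfold Spec_map_all_token_entities_to_text_ranges_py; infer_instance

-- ===== CLAIM (what is proved, stated in full; the proofs are below) =====
def Claim_equal_map_all_token_entities_to_text_ranges_py : Prop := ∀ (total_tokens : List String) (user_provided_text : String), Dom_map_all_token_entities_to_text_ranges_py total_tokens user_provided_text → Spec_map_all_token_entities_to_text_ranges_py total_tokens user_provided_text (map_all_token_entities_to_text_ranges_py total_tokens user_provided_text)

-- ===== LEMMAS AND PROOFS =====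

-- pointwise characterisation of "tok occurs at position tp of text"
lemma pv_prefix_iff (tok text : List Char) (tp : Nat) :
    tok <+: text.drop tp ↔
      ∀ i, i < tok.length → tp + i < text.length ∧ tok.getD i ' ' = text.getD (tp + i) ' ' := by
  constructor
  · intro hpre i hi
    have hlen : tok.length ≤ text.length - tp := by
      simpa using hpre.length_le
    have h1 : tp + i < text.length := by omega
    have h2 : i < (text.drop tp).length := by simp; omega
    have hg := List.IsPrefix.getElem hpre hi
    rw [List.getElem_drop] at hg
    refine ⟨h1, ?_⟩
    rw [List.getD_eq_getElem _ _ hi, List.getD_eq_getElem _ _ h1]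
    exact hg
  · intro hpt
    have hlen : tok.length ≤ text.length - tp := by
      rcases Nat.eq_zero_or_pos tok.length with h0 | h0
      · omega
      · have := (hpt (tok.length - 1) (by omega)).1; omega
    have : tok = (text.drop tp).take tok.length := by
      apply List.ext_getElem
      · simp; omega
      · intro i hi1 hi2
        have hi : i < tok.length := hi1
        obtain ⟨h1, h2⟩ := hpt i hi
        rw [List.getD_eq_getElem _ _ hi, List.getD_eq_getElem _ _ h1] at h2
        simpa [List.getElem_take, List.getElem_drop] using h2
    rw [this]
    exact List.take_prefix _ _

-- the equation of pvMidA with its local `let` expanded (used to rewrite with if_pos/if_neg)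
lemma pvMidA_unfold (tok text : List Char) (tp : Nat) :
    pvMidA tok text tp =
      if tp < text.length then
        (if tok.length ≤ pvInnerA tok text tp 0 then
          (tp + pvInnerA tok text tp 0, some (tp, tp + pvInnerA tok text tp 0))
        else pvMidA tok text (tp + 1))
      else (tp, none) := by
  rcases Nat.lt_or_ge tp text.length with h | h
  · rw [pvMidA, dif_pos h, if_pos h]
  · rw [pvMidA, dif_neg (Nat.not_lt.2 h), if_neg (Nat.not_lt.2 h)]

-- if A's inner scan ran to the end of the token, every scanned position matched
lemma pvInnerA_matches (tok text : List Char) (tp ntp : Nat) :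
    tok.length ≤ pvInnerA tok text tp ntp →
    ∀ i, ntp ≤ i → i < tok.length →
      tp + i < text.length ∧ tok.getD i ' ' = text.getD (tp + i) ' ' := by
  induction ntp using pvInnerA.induct tok text tp with
  | case1 ntp h ih =>
    intro hfull i hi1 hi2
    rw [pvInnerA, dif_pos h] at hfull
    rcases Nat.eq_or_lt_of_le hi1 with rfl | hlt
    · exact ⟨h.2.1, h.2.2⟩
    · exact ih hfull i hlt hi2
  | case2 ntp h =>
    intro hfull i hi1 hi2
    rw [pvInnerA, dif_neg h] at hfull
    omega

-- conversely, if the token occurs at tp then the inner scan runs to the end of the token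
lemma pvInnerA_full (tok text : List Char) (tp ntp : Nat) :
    tok <+: text.drop tp → ntp ≤ tok.length → pvInnerA tok text tp ntp = tok.length := by
  induction ntp using pvInnerA.induct tok text tp with
  | case1 ntp h ih =>
    intro hpre hle
    rw [pvInnerA, dif_pos h]
    exact ih hpre (by omega)
  | case2 ntp h =>
    intro hpre hle
    rcases Nat.eq_or_lt_of_le hle with rfl | hlt
    · rw [pvInnerA, dif_neg h]
    · obtain ⟨h1, h2⟩ := (pv_prefix_iff tok text tp).1 hpre ntp hlt
      exact absurd ⟨hlt, h1, h2⟩ h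

-- A's middle loop when the token occurs nowhere at or after tp: it consumes the text
lemma pvMidA_none (tok text : List Char) (tp : Nat) :
    tp ≤ text.length → (∀ j, tp ≤ j → ¬ tok <+: text.drop j) →
    pvMidA tok text tp = (text.length, none) := by
  induction tp using pvMidA.induct tok text with
  | case1 tp h ntp hfound =>
    intro _ hno
    have hf' : tok.length ≤ pvInnerA tok text tp 0 := hfound
    exfalso
    refine hno tp le_rfl ((pv_prefix_iff tok text tp).2 ?_)
    exact fun i hi1 => pvInnerA_matches tok text tp 0 hf' i (Nat.zero_le i) hi1
  | case2 tp h ntp hfound ih =>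
    intro _ hno
    have hf' : ¬ tok.length ≤ pvInnerA tok text tp 0 := hfound
    rw [pvMidA_unfold, if_pos h, if_neg hf']
    exact ih (by omega) (fun j hj => hno j (by omega))
  | case3 tp h =>
    intro htp _
    have heq : tp = text.length := by omega
    rw [pvMidA_unfold, if_neg h, heq]

-- A's middle loop when j is the first occurrence of the token at or after tp
lemma pvMidA_some (tok text : List Char) (j : Nat) : ∀ tp : Nat,
    tp < text.length → tp ≤ j → j ≤ text.length → tok <+: text.drop j →
    (∀ i, tp ≤ i → i < j → ¬ tok <+: text.drop i) →
    pvMidA tok text tp = (j + tok.length, some (j, j + tok.length)) := by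
  intro tp
  induction tp using pvMidA.induct tok text with
  | case1 tp h ntp hfound =>
    intro htp hj hjle hpre hmin
    have hf' : tok.length ≤ pvInnerA tok text tp 0 := hfound
    have hptw := pvInnerA_matches tok text tp 0 hf'
    have hpre0 : tok <+: text.drop tp :=
      (pv_prefix_iff tok text tp).2 (fun i hi => hptw i (Nat.zero_le i) hi)
    have hjeq : j = tp := by
      by_contra hne
      exact hmin tp le_rfl (by omega) hpre0
    have hntp : pvInnerA tok text tp 0 = tok.length := pvInnerA_full tok text tp 0 hpre0 (Nat.zero_le _)
    rw [pvMidA_unfold, if_pos h, if_pos hf', hntp, hjeq]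
  | case2 tp h ntp hfound ih =>
    intro htp hj hjle hpre hmin
    have hf' : ¬ tok.length ≤ pvInnerA tok text tp 0 := hfound
    have hpre0 : ¬ tok <+: text.drop tp := by
      intro hp
      exact hf' (le_of_eq (pvInnerA_full tok text tp 0 hp (Nat.zero_le _)).symm)
    have htok : tok ≠ [] := by
      intro h0; exact hpre0 (by simp [h0])
    have hjne : j ≠ tp := fun he => hpre0 (he ▸ hpre)
    have hjlt : j < text.length := by
      rcases Nat.eq_or_lt_of_le hjle with rfl | hlt
      · exfalso
        rw [List.drop_length] at hpre
        exact htok (List.prefix_nil.1 hpre)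
      · exact hlt
    rw [pvMidA_unfold, if_pos h, if_neg hf']
    exact ih (by omega) (by omega) hjle hpre (fun i hi1 hi2 => hmin i (by omega) hi2)
  | case3 tp h =>
    intro htp; omega

-- once the text pointer reached the end of the text, A adds nothing more
lemma pvOuterA_ge (text : List Char) (toks : List String) (idx tp : Nat) :
    text.length ≤ tp → pvOuterA text toks idx tp = [] := by
  induction toks generalizing idx with
  | nil => intro _; rfl
  | cons tok rest ih =>
    intro h
    have hmid : pvMidA tok.toList text tp = (tp, none) := by
      rw [pvMidA_unfold, if_neg (by omega)]
    simp only [pvOuterA, hmid]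
    exact ih (idx + 1) h

-- B's comprehension test `text[i:i+len(tok)] == tok` is exactly "tok occurs at i"
lemma pvOcc_pred (text tok : List Char) (i : Nat) :
    (PySem.List.slice text (some (i : Int)) (some ((i : Int) + (tok.length : Int))) == tok) =
      decide (tok <+: text.drop i) := by
  rw [PySem.List.slice_natCast_add]
  by_cases h : tok <+: text.drop i
  · simp [h, ← List.prefix_iff_eq_take.1 h]
  · simp [h]
    intro he
    exact h (List.prefix_iff_eq_take.2 he.symm)

-- B's occurrence list, re-expressed through the prefix predicate
lemma pvOcc_eq (text tok : List Char) :
    pvOcc text tok =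
      ((List.range (text.length + 1)).filter (fun i => decide (tok <+: text.drop i))).map
        (fun i => (i, i + tok.length)) := by
  unfold pvOcc
  congr 1
  apply List.filter_congr
  intro i _
  exact pvOcc_pred text tok i

-- find? over `range m` returns the smallest index satisfying the predicate
lemma pv_find_range (m j : Nat) (p : Nat → Bool) (h : (List.range m).find? p = some j) :
    j < m ∧ p j = true ∧ ∀ i, i < j → p i = false := by
  rw [List.find?_eq_some_iff_append] at h
  obtain ⟨hpj, l₁, l₂, heq, hmin⟩ := h
  have hjlt : j < m := by
    have : j ∈ List.range m := by rw [heq]; simp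
    simpa using this
  have hlen : l₁.length < m := by
    have := congrArg List.length heq; simp at this; omega
  have hjval : j = l₁.length := by
    have h1 : (l₁ ++ j :: l₂)[l₁.length]? = some j := by
      simp
    rw [← heq, List.getElem?_range hlen] at h1
    exact (Option.some_inj.1 h1).symm
  have hl1 : l₁ = List.range j := by
    rw [hjval]
    have ht : (List.range m).take l₁.length = l₁ := by
      rw [heq]; simp
    rw [List.take_range, Nat.min_eq_left (by omega)] at ht
    exact ht.symm
  refine ⟨hjlt, hpj, fun i hij => ?_⟩
  have : i ∈ l₁ := by rw [hl1]; simpa using hij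
  have := hmin i this
  simpa using this

-- B's `next(...)` over the occurrence list, as find? over the raw index range
lemma pv_find_occ (text tok : List Char) (pos : Nat) :
    (pvOcc text tok).find? (fun se => decide (pos ≤ se.1)) =
      ((List.range (text.length + 1)).find?
        (fun i => decide (pos ≤ i) && decide (tok <+: text.drop i))).map
        (fun i => (i, i + tok.length)) := by
  rw [pvOcc_eq, List.find?_map, List.find?_filter]
  congr 1
  congr 1
  funext i
  by_cases h1 : pos ≤ i <;> by_cases h2 : tok <+: text.drop i <;>
    simp [h1, h2, Function.comp]

-- stage 1's loop: every token of the list ends up indexed with its occurrence list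
lemma pvIndex_aux (text : List Char) : ∀ (toks : List String)
    (d : PySem.Dict String (List (Nat × Nat))),
    (∀ t, d.contains t = true → d.getD t [] = pvOcc text t.toList) →
    (∀ tok ∈ toks,
      (toks.foldl (fun d tok => if d.contains tok = false then d.insert tok (pvOcc text tok.toList) else d) d).getD tok [] = pvOcc text tok.toList) ∧
    (∀ t, d.contains t = true →
      (toks.foldl (fun d tok => if d.contains tok = false then d.insert tok (pvOcc text tok.toList) else d) d).getD t [] = pvOcc text t.toList) := by
  intro toks
  induction toks with
  | nil =>
    intro d hQ
    exact ⟨fun tok h => absurd h (List.not_mem_nil), fun t ht => hQ t ht⟩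
  | cons tok rest ih =>
    intro d hQ
    set d' := if d.contains tok = false then d.insert tok (pvOcc text tok.toList) else d with hd'
    have hQ' : ∀ t, d'.contains t = true → d'.getD t [] = pvOcc text t.toList := by
      intro t ht
      rw [hd'] at ht ⊢
      by_cases hc : d.contains tok = false
      · rw [if_pos hc] at ht ⊢
        by_cases hteq : t = tok
        · subst hteq
          rw [PySem.Dict.getD_insert_self]
        · rw [PySem.Dict.getD_insert_of_ne _ _ _ hteq]
          apply hQ
          rw [PySem.Dict.contains_insert] at ht
          simpa [hteq] using ht
      · rw [if_neg hc] at ht ⊢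
        exact hQ t ht
    have hC' : d'.contains tok = true := by
      rw [hd']
      by_cases hc : d.contains tok = false
      · rw [if_pos hc]; exact PySem.Dict.contains_insert_self _ _ _
      · rw [if_neg hc]; simpa using hc
    obtain ⟨ih1, ih2⟩ := ih d' hQ'
    constructor
    · intro t htmem
      rcases List.mem_cons.1 htmem with rfl | hrest
      · exact ih2 t hC'
      · exact ih1 t hrest
    · intro t ht
      apply ih2
      rw [hd']
      by_cases hc : d.contains tok = false
      · rw [if_pos hc, PySem.Dict.contains_insert, ht]; simp
      · rw [if_neg hc]; exact ht

lemma pvIndexB_getD (text : List Char) (toks : List String) (tok : String) (h : tok ∈ toks) :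
    (pvIndexB text toks).getD tok [] = pvOcc text tok.toList := by
  have := (pvIndex_aux text toks PySem.Dict.empty
    (fun t ht => by simp [PySem.Dict.contains_empty] at ht)).1
  exact this tok h

-- the two algorithms agree from every cursor position pos ≤ len(text), provided the
-- index carries the occurrence lists of all remaining tokens
lemma pv_main (text : List Char) (index : PySem.Dict String (List (Nat × Nat))) :
    ∀ (toks : List String) (idx pos : Nat), pos ≤ text.length →
    (∀ tok ∈ toks, index.getD tok [] = pvOcc text tok.toList) →
    pvOuterA text toks idx pos = pvSelB text index toks idx pos := by
  intro toks
  induction toks with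
  | nil => intro idx pos _ _; rfl
  | cons tok rest ih =>
    intro idx pos hpos hidx
    by_cases hge : text.length ≤ pos
    · rw [pvOuterA_ge text _ idx pos hge]
      rw [pvSelB, if_pos hge]
    · have hlt : pos < text.length := by omega
      have hocc := hidx tok (List.mem_cons_self)
      have hfind : ((index.getD tok []).find? (fun se => decide (pos ≤ se.1))) =
          ((List.range (text.length + 1)).find?
            (fun i => decide (pos ≤ i) && decide (tok.toList <+: text.drop i))).map
            (fun i => (i, i + tok.toList.length)) := by
        rw [hocc]; exact pv_find_occ text tok.toList pos
      cases hF : (List.range (text.length + 1)).find?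
          (fun i => decide (pos ≤ i) && decide (tok.toList <+: text.drop i)) with
      | none =>
        have hnone := List.find?_eq_none.1 hF
        have hno : ∀ j, pos ≤ j → ¬ tok.toList <+: text.drop j := by
          intro j hj hp
          by_cases hjn : j ≤ text.length
          · have := hnone j (by simp; omega)
            simp at this
            exact this hj hp
          · have hdrop : text.drop j = [] := List.drop_eq_nil_of_le (by omega)
            rw [hdrop] at hp
            have htok : tok.toList = [] := List.prefix_nil.1 hp
            have := hnone pos (by simp; omega)
            simp [htok] at this
        have hmid := pvMidA_none tok.toList text pos (le_of_lt hlt) hno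
        simp only [pvOuterA, hmid]
        rw [pvOuterA_ge text rest (idx + 1) text.length le_rfl]
        rw [pvSelB, if_neg hge, hfind, hF]
        rfl
      | some j =>
        obtain ⟨hjlt, hpj, hminj⟩ := pv_find_range _ _ _ hF
        simp only [Bool.and_eq_true, decide_eq_true_eq] at hpj
        obtain ⟨hposj, hpre⟩ := hpj
        have hmin : ∀ i, pos ≤ i → i < j → ¬ tok.toList <+: text.drop i := by
          intro i h1 h2 hp
          have := hminj i h2
          simp at this
          exact this h1 hp
        have hjle : j ≤ text.length := by omega
        have hlen : tok.toList.length ≤ text.length - j := by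
          simpa using hpre.length_le
        have hmid := pvMidA_some tok.toList text j pos hlt hposj hjle hpre hmin
        simp only [pvOuterA, hmid]
        rw [pvSelB, if_neg hge, hfind, hF]
        simp only [Option.map_some]
        congr 1
        exact ih (idx + 1) (j + tok.toList.length) (by omega)
          (fun t ht => hidx t (List.mem_cons_of_mem _ ht))

-- ===== VERDICT (by name: the statement is the Claim_ definition above) =====
theorem map_all_token_entities_to_text_ranges_py_spec : Claim_equal_map_all_token_entities_to_text_ranges_py := by
  intro total_tokens user_provided_text _
  unfold Spec_map_all_token_entities_to_text_ranges_py
  unfold map_all_token_entities_to_text_ranges_py map_all_token_entities_to_text_ranges_py_alt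
  exact pv_main user_provided_text.toList (pvIndexB user_provided_text.toList total_tokens)
    total_tokens 0 0 (Nat.zero_le _)
    (fun tok h => pvIndexB_getD user_provided_text.toList total_tokens tok h)
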